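-- pv_equiv track=rewrite | github.com/hy714335634/Nexus-AI | tools/generated_tools/aws_architecture_generator/architecture_validator.py | _generate_well_architected_recommendations
-- ===== SOURCE A (Python) =====
-- from typing import Dict, List, Optional, Any, Union, Set, Tuple
--
-- def _generate_well_architected_recommendations(findings: Dict[str, List[Dict[str, Any]]]) -> List[Dict[str, Any]]:
--     """Generate recommendations based on Well-Architected findings."""
--     recommendations = []
--
--     for pillar, pillar_findings in findings.items():
--         for finding in pillar_findings:
--             if finding.get("risk") in ["high", "medium"]:
--                 recommendations.append({
--                     "pillar": pillar,
--                     "priority": "high" if finding.get("risk") == "high" else "medium",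
--                     "title": finding.get("question", ""),
--                     "description": finding.get("description", ""),
--                     "impact": "Addressing this finding will improve your architecture's alignment with the AWS Well-Architected Framework."
--                 })
--
--     # Sort recommendations by priority
--     recommendations.sort(key=lambda x: 0 if x["priority"] == "high" else 1)
--
--     return recommendations
-- ===== SOURCE B (Python) =====
-- _IMPACT = ("Addressing this finding will improve your architecture's alignment "
--            "with the AWS Well-Architected Framework.")
--
--
-- def _recommendation(pillar, finding, priority):
--     return {
--         "pillar": pillar,
--         "priority": priority,
--         "title": finding.get("question", ""),
--         "description": finding.get("description", ""),
--         "impact": _IMPACT,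
--     }
--
--
-- def _generate_well_architected_recommendations(findings):
--     """Generate recommendations based on Well-Architected findings."""
--     # Flatten once, then take two staged passes: all high-risk findings
--     # (in original order) followed by all medium-risk ones.  This yields
--     # exactly the order a stable sort by priority would produce, with no sort.
--     pairs = [(pillar, finding)
--              for pillar, pillar_findings in findings.items()
--              for finding in pillar_findings]
--     return ([_recommendation(p, f, "high") for p, f in pairs if f.get("risk") == "high"]
--             + [_recommendation(p, f, "medium") for p, f in pairs if f.get("risk") == "medium"])
-- ===== Notes on version B (the rewrite author's own statement) =====
-- stated objective: simpler
-- what changed: B flattens the findings into (pillar, finding) pairs once and builds the result as two staged filter passes (high first, then medium), eliminating A's accumulator loop and its final stable sort.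
import Mathlib
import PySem

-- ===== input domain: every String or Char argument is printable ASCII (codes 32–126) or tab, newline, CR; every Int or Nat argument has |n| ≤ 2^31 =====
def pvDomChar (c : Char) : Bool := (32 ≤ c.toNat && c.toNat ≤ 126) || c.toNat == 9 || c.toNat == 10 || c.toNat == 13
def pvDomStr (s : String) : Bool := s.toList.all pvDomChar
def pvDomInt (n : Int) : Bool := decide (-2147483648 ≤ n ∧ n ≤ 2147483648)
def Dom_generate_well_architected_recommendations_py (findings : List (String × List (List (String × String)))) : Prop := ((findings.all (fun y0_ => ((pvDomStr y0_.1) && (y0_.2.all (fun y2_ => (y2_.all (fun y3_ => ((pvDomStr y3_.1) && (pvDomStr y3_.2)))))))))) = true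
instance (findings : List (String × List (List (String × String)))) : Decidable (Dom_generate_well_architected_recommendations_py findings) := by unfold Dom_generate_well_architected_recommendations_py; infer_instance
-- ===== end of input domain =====

-- B replaces A's accumulate-then-stable-sort loop with a flatten plus two staged
-- filter passes (high first, then medium); objective: simpler — no sort, no accumulator.

-- ===== PORT A =====
-- one pass appending every qualifying recommendation, then a stable sort by priority key
def generate_well_architected_recommendations_py (findings : List (String × List (List (String × String)))) : List (List (String × String)) :=
  let recommendations : List (List (String × String)) :=
    findings.foldl (fun recs pf =>
      pf.2.foldl (fun recs finding =>
        let r := PySem.Dict.get? ⟨finding⟩ "risk"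
        if r == some "high" || r == some "medium" then
          recs ++ [[("pillar", pf.1),
                    ("priority", if r == some "high" then "high" else "medium"),
                    ("title", PySem.Dict.getD ⟨finding⟩ "question" ""),
                    ("description", PySem.Dict.getD ⟨finding⟩ "description" ""),
                    ("impact", "Addressing this finding will improve your architecture's alignment with the AWS Well-Architected Framework.")]]
        else recs) recs) []
  PySem.List.sorted recommendations
    (fun x => if PySem.Dict.get? ⟨x⟩ "priority" == some "high" then (0 : Int) else 1) false

-- ===== PORT B =====
-- helper _recommendation of Source B
def pvRecommendation (pillar : String) (finding : List (String × String)) (priority : String) : List (String × String) :=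
  [("pillar", pillar),
   ("priority", priority),
   ("title", PySem.Dict.getD ⟨finding⟩ "question" ""),
   ("description", PySem.Dict.getD ⟨finding⟩ "description" ""),
   ("impact", "Addressing this finding will improve your architecture's alignment with the AWS Well-Architected Framework.")]

-- flatten once; two staged comprehensions (filter + map), high then medium; no sort
def generate_well_architected_recommendations_py_alt (findings : List (String × List (List (String × String)))) : List (List (String × String)) :=
  let pairs : List (String × List (String × String)) :=
    findings.flatMap (fun pf => pf.2.map (fun finding => (pf.1, finding)))
  ((pairs.filter (fun q => PySem.Dict.get? ⟨q.2⟩ "risk" == some "high")).map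
      (fun q => pvRecommendation q.1 q.2 "high"))
  ++ ((pairs.filter (fun q => PySem.Dict.get? ⟨q.2⟩ "risk" == some "medium")).map
      (fun q => pvRecommendation q.1 q.2 "medium"))

-- ===== PRECONDITION & SPEC =====
def Spec_generate_well_architected_recommendations_py (findings : List (String × List (List (String × String)))) (out : List (List (String × String))) : Prop := out = generate_well_architected_recommendations_py_alt findings
instance (findings : List (String × List (List (String × String)))) (out : List (List (String × String))) : Decidable (Spec_generate_well_architected_recommendations_py findings out) := by unfold Spec_generate_well_architected_recommendations_py; infer_instance

-- ===== CLAIM (what is proved, stated in full; the proofs are below) =====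
def Claim_equal_generate_well_architected_recommendations_py : Prop := ∀ (findings : List (String × List (List (String × String)))), Dom_generate_well_architected_recommendations_py findings → Spec_generate_well_architected_recommendations_py findings (generate_well_architected_recommendations_py findings)

-- ===== LEMMAS AND PROOFS =====

-- named copies of the pieces A's port is built from (definitionally equal to the inlined code)
def pvRisk (f : List (String × String)) : Option String := PySem.Dict.get? ⟨f⟩ "risk"

def pvRec (pillar : String) (f : List (String × String)) : List (String × String) :=
  [("pillar", pillar),
   ("priority", if pvRisk f == some "high" then "high" else "medium"),
   ("title", PySem.Dict.getD ⟨f⟩ "question" ""),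
   ("description", PySem.Dict.getD ⟨f⟩ "description" ""),
   ("impact", "Addressing this finding will improve your architecture's alignment with the AWS Well-Architected Framework.")]

def pvInnerA (pillar : String) (fs : List (List (String × String))) (init : List (List (String × String))) : List (List (String × String)) :=
  fs.foldl (fun recs f =>
    if pvRisk f == some "high" || pvRisk f == some "medium" then recs ++ [pvRec pillar f] else recs) init

def pvOuterA (findings : List (String × List (List (String × String)))) (init : List (List (String × String))) : List (List (String × String)) :=
  findings.foldl (fun recs pf => pvInnerA pf.1 pf.2 recs) init

def pvIsHigh (x : List (String × String)) : Bool := PySem.Dict.get? ⟨x⟩ "priority" == some "high"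

def pvKey (x : List (String × String)) : Int := if pvIsHigh x then 0 else 1

def pvPairs (findings : List (String × List (List (String × String)))) : List (String × List (String × String)) :=
  findings.flatMap (fun pf => pf.2.map (fun finding => (pf.1, finding)))

theorem pvA_eq (findings : List (String × List (List (String × String)))) :
    generate_well_architected_recommendations_py findings =
      PySem.List.sorted (pvOuterA findings []) pvKey false := rfl

theorem pvB_eq (findings : List (String × List (List (String × String)))) :
    generate_well_architected_recommendations_py_alt findings =
      ((pvPairs findings).filter (fun q => pvRisk q.2 == some "high")).map
          (fun q => pvRecommendation q.1 q.2 "high")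
      ++ ((pvPairs findings).filter (fun q => pvRisk q.2 == some "medium")).map
          (fun q => pvRecommendation q.1 q.2 "medium") := rfl

-- insertBy skips a prefix none of whose elements x goes before
theorem pv_insertBy_skip {α : Type} (before : α → α → Bool) (x : α) (as bs : List α)
    (h : ∀ a ∈ as, before x a = false) :
    PySem.List.insertBy before x (as ++ bs) = as ++ PySem.List.insertBy before x bs := by
  induction as with
  | nil => simp
  | cons a as ih =>
    simp only [List.cons_append, PySem.List.insertBy, h a (by simp)]
    simp [ih (fun a ha => h a (by simp [ha]))]

-- insertBy puts x in front when x goes before every element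
theorem pv_insertBy_front {α : Type} (before : α → α → Bool) (x : α) (bs : List α)
    (h : ∀ b ∈ bs, before x b = true) :
    PySem.List.insertBy before x bs = x :: bs := by
  cases bs with
  | nil => rfl
  | cons b bs => simp [PySem.List.insertBy, h b (by simp)]

-- a stable sort by a {0,1}-valued key is filter-0 ++ filter-1
theorem pv_sorted_two_key {α : Type} (key : α → Int) (hk : ∀ x, key x = 0 ∨ key x = 1)
    (l : List α) :
    PySem.List.sorted l key false =
      l.filter (fun x => key x == 0) ++ l.filter (fun x => key x != 0) := by
  induction l using List.reverseRecOn with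
  | nil => rfl
  | append_singleton l x ih =>
    have hfold : PySem.List.sorted (l ++ [x]) key false =
        PySem.List.insertBy (fun a b => decide (key a < key b)) x (PySem.List.sorted l key false) := by
      simp [PySem.List.sorted_eq_foldl_insertBy, List.foldl_append]
    rw [hfold, ih]
    rcases hk x with h0 | h1
    · rw [pv_insertBy_skip _ _ _ _ (fun a ha => by
        have := List.of_mem_filter ha
        simp only [beq_iff_eq] at this
        simp [h0, this])]
      rw [pv_insertBy_front _ _ _ (fun b hb => by
        have := List.of_mem_filter hb
        rcases hk b with hb0 | hb1
        · simp [hb0] at this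
        · simp [h0, hb1])]
      simp [List.filter_append, h0]
    · rw [show PySem.List.insertBy (fun a b => decide (key a < key b)) x
            (l.filter (fun x => key x == 0) ++ l.filter (fun x => key x != 0)) =
            (l.filter (fun x => key x == 0) ++ l.filter (fun x => key x != 0)) ++ [x] from
        PySem.List.insertBy_of_forall_not_before _ _ _ (fun y _ => by
          rcases hk y with hy | hy <;> simp [h1, hy])]
      simp [List.filter_append, h1]

-- the priority field of a built record tracks the risk test
theorem pvIsHigh_pvRec (pillar : String) (f : List (String × String)) :
    pvIsHigh (pvRec pillar f) = (pvRisk f == some "high") := by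
  by_cases h : (pvRisk f == some "high") = true <;>
    simp [pvIsHigh, pvRec, PySem.Dict.get?, List.find?, h]

-- A's folds only append: the accumulator factors out
theorem pvInnerA_append (pillar : String) (fs : List (List (String × String)))
    (init : List (List (String × String))) :
    pvInnerA pillar fs init = init ++ pvInnerA pillar fs [] := by
  induction fs generalizing init with
  | nil => simp [pvInnerA]
  | cons f fs ih =>
    show pvInnerA pillar fs _ = _
    by_cases hc : (pvRisk f == some "high" || pvRisk f == some "medium") = true
    · simp only [pvInnerA, List.foldl_cons, hc, if_pos]
      rw [show fs.foldl _ (init ++ [pvRec pillar f]) = pvInnerA pillar fs (init ++ [pvRec pillar f]) from rfl,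
          show fs.foldl _ ([] ++ [pvRec pillar f]) = pvInnerA pillar fs ([] ++ [pvRec pillar f]) from rfl,
          ih (init ++ [pvRec pillar f]), ih ([] ++ [pvRec pillar f])]
      simp
    · simp only [pvInnerA, List.foldl_cons, hc, if_neg, Bool.false_eq_true, not_false_iff]
      exact ih init

theorem pvOuterA_append (findings : List (String × List (List (String × String))))
    (init : List (List (String × String))) :
    pvOuterA findings init = init ++ pvOuterA findings [] := by
  induction findings generalizing init with
  | nil => simp [pvOuterA]
  | cons pf fs ih =>
    rw [show pvOuterA (pf :: fs) init = pvOuterA fs (pvInnerA pf.1 pf.2 init) from rfl,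
        show pvOuterA (pf :: fs) [] = pvOuterA fs (pvInnerA pf.1 pf.2 []) from rfl,
        ih (pvInnerA pf.1 pf.2 init), ih (pvInnerA pf.1 pf.2 []), pvInnerA_append pf.1 pf.2 init]
    simp

-- A's inner fold is a filter+map over the findings of one pillar
theorem pvInnerA_filterMap (pillar : String) (fs : List (List (String × String))) :
    pvInnerA pillar fs [] =
      (fs.filter (fun f => pvRisk f == some "high" || pvRisk f == some "medium")).map (pvRec pillar) := by
  induction fs with
  | nil => rfl
  | cons f fs ih =>
    by_cases hc : (pvRisk f == some "high" || pvRisk f == some "medium") = true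
    · simp only [pvInnerA, List.foldl_cons, hc, if_pos]
      rw [show fs.foldl _ ([] ++ [pvRec pillar f]) = pvInnerA pillar fs ([] ++ [pvRec pillar f]) from rfl,
          pvInnerA_append, ih]
      simp [hc]
    · simp only [pvInnerA, List.foldl_cons, hc, if_neg, Bool.false_eq_true, not_false_iff]
      rw [show fs.foldl _ [] = pvInnerA pillar fs [] from rfl, ih]
      simp [hc]

-- A's whole collection phase is a filter+map over the flattened pairs
theorem pvOuterA_filterMap (findings : List (String × List (List (String × String)))) :
    pvOuterA findings [] =
      ((pvPairs findings).filter (fun q => pvRisk q.2 == some "high" || pvRisk q.2 == some "medium")).map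
        (fun q => pvRec q.1 q.2) := by
  induction findings with
  | nil => rfl
  | cons pf fs ih =>
    rw [show pvOuterA (pf :: fs) [] = pvOuterA fs (pvInnerA pf.1 pf.2 []) from rfl,
        pvOuterA_append, ih, pvInnerA_filterMap]
    simp [pvPairs, List.filter_map, List.map_map, Function.comp_def]

-- a finding cannot be both high and medium risk
theorem pv_not_both (f : List (String × String)) (h : (pvRisk f == some "high") = true) :
    (pvRisk f == some "medium") = false := by
  simp only [beq_iff_eq] at h ⊢
  rw [h]; simp

-- ===== VERDICT (by name: the statement is the Claim_ definition above) =====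
theorem generate_well_architected_recommendations_py_spec : Claim_equal_generate_well_architected_recommendations_py := by
  intro findings _
  unfold Spec_generate_well_architected_recommendations_py
  rw [pvA_eq, pvB_eq, pvOuterA_filterMap,
    pv_sorted_two_key pvKey (fun x => by unfold pvKey; by_cases h : pvIsHigh x = true <;> simp [h])]
  congr 1
  · rw [List.filter_map, List.filter_filter]
    have : ∀ q : String × List (String × String),
        (((fun x => pvKey x == 0) ∘ fun q => pvRec q.1 q.2) q
          && (pvRisk q.2 == some "high" || pvRisk q.2 == some "medium"))
        = (pvRisk q.2 == some "high") := by
      intro q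
      simp only [Function.comp, pvKey, pvIsHigh_pvRec]
      by_cases h : (pvRisk q.2 == some "high") = true <;> simp [h]
    rw [List.filter_congr (fun q _ => this q)]
    refine List.map_congr_left (fun q hq => ?_)
    have hh := List.of_mem_filter hq
    simp [pvRec, pvRecommendation, hh]
  · rw [List.filter_map, List.filter_filter]
    have : ∀ q : String × List (String × String),
        (((fun x => pvKey x != 0) ∘ fun q => pvRec q.1 q.2) q
          && (pvRisk q.2 == some "high" || pvRisk q.2 == some "medium"))
        = (pvRisk q.2 == some "medium") := by
      intro q
      simp only [Function.comp, pvKey, pvIsHigh_pvRec]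
      by_cases h : (pvRisk q.2 == some "high") = true
      · simp [h, pv_not_both q.2 h]
      · simp [h]
    rw [List.filter_congr (fun q _ => this q)]
    refine List.map_congr_left (fun q hq => ?_)
    have hm := List.of_mem_filter hq
    have hnh : (pvRisk q.2 == some "high") = false := by
      simp only [beq_iff_eq] at hm ⊢
      rw [hm]; simp
    simp [pvRec, pvRecommendation, hnh]
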